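-- pv_equiv track=rewrite | github.com/matthewod11-stack/AskHR | eval/utils.py | any_expected_hit
-- ===== SOURCE A (Python) =====
-- from typing import Iterable, List, Tuple, Dict, Any
--
-- def any_expected_hit(answer: str, paths: List[str], expects: List[str]) -> Tuple[bool, int]:
--     if not expects:
--         return False, 0
--     haystacks = [answer or ""] + paths
--     matched_cites = 0
--     any_hit = False
--     for e in expects:
--         e_low = e.lower()
--         # Count how many citations contain this expected substring
--         cite_hits = sum(1 for p in paths if e_low in p.lower())
--         matched_cites += cite_hits
--         # Also allow answer-text hit to trigger 'hit'
--         if not any_hit and any(e_low in h.lower() for h in haystacks):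
--             any_hit = True
--     return any_hit, matched_cites
-- ===== SOURCE B (Python) =====
-- def any_expected_hit(answer, paths, expects):
--     # Transposed traversal: lower every expect once, then walk the PATHS as the
--     # outer loop, adding per-path how many expects it contains; the hit flag is
--     # derived afterwards from the total plus a single answer-only scan.
--     expects_low = [e.lower() for e in expects]
--     total = 0
--     for p in paths:
--         pl = p.lower()
--         total += sum(1 for e in expects_low if e in pl)
--     answer_low = answer.lower()
--     hit = total > 0 or any(e in answer_low for e in expects_low)
--     return hit, total
-- ===== Notes on version B (the rewrite author's own statement) =====
-- stated objective: alternative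
-- what changed: Transposes the double loop (paths outer, expects inner) with every expect lowered exactly once up front, accumulates the count per path, and derives the hit flag afterwards from total > 0 plus one answer-only scan, dropping A's stateful any_hit flag, haystacks list and empty-expects guard.
import Mathlib
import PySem

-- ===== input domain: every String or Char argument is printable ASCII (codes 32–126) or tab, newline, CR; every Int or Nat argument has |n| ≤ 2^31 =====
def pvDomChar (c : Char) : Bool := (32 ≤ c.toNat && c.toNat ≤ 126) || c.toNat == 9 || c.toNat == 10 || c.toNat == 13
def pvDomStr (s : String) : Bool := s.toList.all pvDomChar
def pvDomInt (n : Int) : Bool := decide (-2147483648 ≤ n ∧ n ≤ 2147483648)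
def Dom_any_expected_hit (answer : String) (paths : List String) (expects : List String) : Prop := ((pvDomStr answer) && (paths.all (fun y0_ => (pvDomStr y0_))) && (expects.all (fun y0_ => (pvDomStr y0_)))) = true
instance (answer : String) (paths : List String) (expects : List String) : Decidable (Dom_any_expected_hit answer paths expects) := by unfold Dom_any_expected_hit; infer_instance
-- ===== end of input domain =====

-- B transposes the double loop (paths outer, expects lowered once each) and derives the hit flag from the total count plus one answer scan (objective: alternative decomposition, same asymptotic cost).

-- ===== PORT A =====
def any_expected_hit (answer : String) (paths : List String) (expects : List String) : Bool × Int :=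
  if expects = [] then (false, 0)
  else
    -- `answer or ""` equals answer for strings ("" is falsy and replaced by "")
    let haystacks := answer :: paths
    let st := expects.foldl (fun (st : Int × Bool) e =>
      let eLow := PySem.Str.lower e
      let citeHits : Int := paths.foldl
        (fun acc p => if PySem.Str.isIn eLow (PySem.Str.lower p) then acc + 1 else acc) 0
      let matched := st.1 + citeHits
      let anyHit :=
        if !st.2 && haystacks.any (fun h => PySem.Str.isIn eLow (PySem.Str.lower h)) then true
        else st.2
      (matched, anyHit)) ((0 : Int), false)
    (st.2, st.1)

-- ===== PORT B =====
def any_expected_hit_alt (answer : String) (paths : List String) (expects : List String) : Bool × Int :=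
  let expectsLow := expects.map PySem.Str.lower
  let total : Int := paths.foldl (fun (acc : Int) p =>
    let pl := PySem.Str.lower p
    acc + ((expectsLow.filter (fun e => PySem.Str.isIn e pl)).length : Int)) 0
  let answerLow := PySem.Str.lower answer
  let hit := decide (total > 0) || expectsLow.any (fun e => PySem.Str.isIn e answerLow)
  (hit, total)

-- ===== PRECONDITION & SPEC =====
def Spec_any_expected_hit (answer : String) (paths : List String) (expects : List String) (out : Bool × Int) : Prop := out = any_expected_hit_alt answer paths expects
instance (answer : String) (paths : List String) (expects : List String) (out : Bool × Int) : Decidable (Spec_any_expected_hit answer paths expects out) := by unfold Spec_any_expected_hit; infer_instance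

-- ===== CLAIM (what is proved, stated in full; the proofs are below) =====
def Claim_equal_any_expected_hit : Prop := ∀ (answer : String) (paths : List String) (expects : List String), Dom_any_expected_hit answer paths expects → Spec_any_expected_hit answer paths expects (any_expected_hit answer paths expects)

-- ===== LEMMAS AND PROOFS =====

-- per-expect count of matching paths, as a Nat
def pvCnt (paths : List String) (e : String) : Nat :=
  (paths.filter (fun p => PySem.Str.isIn (PySem.Str.lower e) (PySem.Str.lower p))).length

lemma pvCnt_foldl (paths : List String) (e : String) : ∀ (a : Int),
    paths.foldl (fun acc p =>
      if PySem.Str.isIn (PySem.Str.lower e) (PySem.Str.lower p) then acc + 1 else acc) a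
    = a + (pvCnt paths e : Int) := by
  induction paths with
  | nil => intro a; simp [pvCnt]
  | cons p t ih =>
    intro a
    rw [List.foldl_cons, ih]
    by_cases h : PySem.Str.isIn (PySem.Str.lower e) (PySem.Str.lower p) = true
    · simp only [pvCnt, List.filter_cons, h, if_true, List.length_cons]
      push_cast; ring
    · simp only [pvCnt, List.filter_cons, h, if_false, Bool.false_eq_true]

lemma pvCnt_pos (paths : List String) (e : String) :
    0 < pvCnt paths e ↔
      ∃ p ∈ paths, PySem.Str.isIn (PySem.Str.lower e) (PySem.Str.lower p) = true := by
  rw [pvCnt, List.length_pos_iff]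
  simp [List.filter_eq_nil_iff]

-- A's loop shape, characterized generically
lemma foldA_general (cnt : String → Int) (hay : String → Bool) :
    ∀ (l : List String) (m : Int) (b : Bool),
      l.foldl (fun (st : Int × Bool) e =>
        (st.1 + cnt e, if !st.2 && hay e then true else st.2)) (m, b)
      = (m + (l.map cnt).sum, b || l.any hay) := by
  intro l
  induction l with
  | nil => intro m b; simp
  | cons e t ih =>
    intro m b
    simp only [List.foldl_cons]
    rw [ih]
    simp only [List.map_cons, List.sum_cons, List.any_cons]
    refine Prod.ext ?_ ?_
    · simp only; ring
    · cases b <;> cases hb : hay e <;> simp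

-- double counting: summing matches path-by-path equals summing expect-by-expect
lemma pvSwap {α β : Type} (pred : α → β → Bool) :
    ∀ (l1 : List α) (l2 : List β),
      (l2.map (fun b => (l1.filter (fun a => pred a b)).length)).sum
      = (l1.map (fun a => (l2.filter (fun b => pred a b)).length)).sum := by
  intro l1
  induction l1 with
  | nil => intro l2; simp
  | cons a t ih =>
    intro l2
    have hstep : (l2.map (fun b => ((a :: t).filter (fun x => pred x b)).length)).sum
        = (l2.filter (fun b => pred a b)).length
          + (l2.map (fun b => (t.filter (fun x => pred x b)).length)).sum := by
      induction l2 with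
      | nil => simp
      | cons b s ihs =>
        rw [List.map_cons, List.sum_cons, ihs]
        simp only [List.filter_cons, List.map_cons, List.sum_cons]
        by_cases h : pred a b = true <;> simp [h] <;> omega
    rw [hstep, List.map_cons, List.sum_cons, ih l2]

lemma pvSum_pos (paths : List String) (expects : List String) :
    0 < (expects.map (fun e => (pvCnt paths e : Int))).sum
    ↔ ∃ e ∈ expects, 0 < pvCnt paths e := by
  have h : (expects.map (fun e => (pvCnt paths e : Int))).sum
      = ((expects.map (pvCnt paths)).sum : Int) := by
    rw [Nat.cast_list_sum, List.map_map]; rfl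
  rw [h, Int.natCast_pos]
  constructor
  · intro hp
    by_contra hc
    push Not at hc
    have hz : (expects.map (pvCnt paths)).sum = 0 := by
      apply List.sum_eq_zero
      intro x hx
      simp only [List.mem_map] at hx
      obtain ⟨e, he, rfl⟩ := hx
      exact Nat.eq_zero_of_not_pos (by exact_mod_cast fun h => absurd h (by exact_mod_cast Nat.not_lt.mpr (hc e he)))
    omega
  · rintro ⟨e, he, hp⟩
    have hle : pvCnt paths e ≤ (expects.map (pvCnt paths)).sum :=
      List.single_le_sum (fun x _ => Nat.zero_le x) _ (List.mem_map_of_mem he)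
    omega

-- B's total equals the expect-by-expect sum A accumulates
lemma pvTotal_eq (paths : List String) (expects : List String) :
    paths.foldl (fun (acc : Int) p =>
      acc + (((expects.map PySem.Str.lower).filter
        (fun e => PySem.Str.isIn e (PySem.Str.lower p))).length : Int)) 0
    = (expects.map (fun e => (pvCnt paths e : Int))).sum := by
  rw [PySem.List.foldl_add paths (fun p => (((expects.map PySem.Str.lower).filter
        (fun e => PySem.Str.isIn e (PySem.Str.lower p))).length : Int)) 0]
  simp only [zero_add]
  have hN : (paths.map (fun p => ((expects.map PySem.Str.lower).filter
        (fun e => PySem.Str.isIn e (PySem.Str.lower p))).length)).sum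
      = (expects.map (pvCnt paths)).sum := by
    have := pvSwap (fun (e : String) (p : String) =>
        PySem.Str.isIn (PySem.Str.lower e) (PySem.Str.lower p)) expects paths
    calc (paths.map (fun p => ((expects.map PySem.Str.lower).filter
            (fun e => PySem.Str.isIn e (PySem.Str.lower p))).length)).sum
        = (paths.map (fun p => (expects.filter
            (fun e => PySem.Str.isIn (PySem.Str.lower e) (PySem.Str.lower p))).length)).sum := by
          apply congrArg
          apply List.map_congr_left
          intro p _
          rw [List.filter_map, List.length_map]
          simp [Function.comp_def]
      _ = (expects.map (pvCnt paths)).sum := this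
  calc (paths.map (fun p => (((expects.map PySem.Str.lower).filter
          (fun e => PySem.Str.isIn e (PySem.Str.lower p))).length : Int))).sum
      = ((paths.map (fun p => ((expects.map PySem.Str.lower).filter
          (fun e => PySem.Str.isIn e (PySem.Str.lower p))).length)).sum : Int) := by
        rw [Nat.cast_list_sum, List.map_map]; rfl
    _ = ((expects.map (pvCnt paths)).sum : Int) := by rw [hN]
    _ = (expects.map (fun e => (pvCnt paths e : Int))).sum := by
        rw [Nat.cast_list_sum, List.map_map]; rfl

set_option maxHeartbeats 800000 in
-- ===== VERDICT (by name: the statement is the Claim_ definition above) =====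
theorem any_expected_hit_spec : Claim_equal_any_expected_hit := by
  intro answer paths expects _
  unfold Spec_any_expected_hit
  by_cases hemp : expects = []
  · subst hemp
    simp [any_expected_hit, any_expected_hit_alt]
  · simp only [any_expected_hit, any_expected_hit_alt, if_neg hemp]
    rw [foldA_general
      (fun e => paths.foldl
        (fun acc p => if PySem.Str.isIn (PySem.Str.lower e) (PySem.Str.lower p) then acc + 1 else acc) 0)
      (fun e => (answer :: paths).any (fun h => PySem.Str.isIn (PySem.Str.lower e) (PySem.Str.lower h)))
      expects 0 false]
    rw [pvTotal_eq]
    have hmapA : expects.map (fun e => paths.foldl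
        (fun acc p => if PySem.Str.isIn (PySem.Str.lower e) (PySem.Str.lower p) then acc + 1 else acc) 0)
        = expects.map (fun e => (pvCnt paths e : Int)) := by
      apply List.map_congr_left
      intro e _
      rw [pvCnt_foldl]
      ring
    rw [hmapA]
    refine Prod.ext ?_ ?_
    · -- boolean component
      simp only [Bool.false_or]
      rw [Bool.eq_iff_iff]
      simp only [List.any_eq_true, List.any_map, Function.comp, Bool.or_eq_true,
        decide_eq_true_eq, gt_iff_lt, pvSum_pos, pvCnt_pos, List.mem_cons]
      constructor
      · rintro ⟨e, he, h, (rfl | hp), hin⟩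
        · exact Or.inr ⟨e, he, hin⟩
        · exact Or.inl ⟨e, he, h, hp, hin⟩
      · rintro (⟨e, he, p, hp, hin⟩ | ⟨e, he, hAns⟩)
        · exact ⟨e, he, p, Or.inr hp, hin⟩
        · exact ⟨e, he, answer, Or.inl rfl, hAns⟩
    · simp only [zero_add]
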